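-- pv_equiv track=rewrite | github.com/micromass/Noah | Noah.py | GREVLEX
-- ===== SOURCE A (Python) =====
-- def GREVLEX(alpha, beta):
--     if not len(alpha) == len(beta):
--         raise ValueError("Arguments not of same length")
--     if sum(alpha) < sum(beta):
--         return True
--     if sum(alpha) > sum(beta):
--         return False
--     n = len(alpha)
--     for iter in range(0,n):
--         if alpha[n-1-iter] < beta[n-1-iter]:
--             return False
--         if alpha[n-1-iter] > beta[n-1-iter]:
--             return True
--     return False
-- ===== SOURCE B (Python) =====
-- def GREVLEX(alpha, beta):
--     if not len(alpha) == len(beta):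
--         raise ValueError("Arguments not of same length")
--     s = 0
--     d = 0
--     for a, b in zip(alpha, beta):
--         s += a - b
--         if a != b:
--             d = a - b
--     return s < 0 or (s == 0 and d > 0)
-- ===== Notes on version B (the rewrite author's own statement) =====
-- stated objective: alternative
-- what changed: Replaces A's staged passes (two sum passes, then a reverse-indexed scan with early returns) by one fused forward pass over zip(alpha, beta) that accumulates the total-degree difference s and the delta d of the last differing coordinate, finishing with the formula s < 0 or (s == 0 and d > 0).
import Mathlib
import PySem

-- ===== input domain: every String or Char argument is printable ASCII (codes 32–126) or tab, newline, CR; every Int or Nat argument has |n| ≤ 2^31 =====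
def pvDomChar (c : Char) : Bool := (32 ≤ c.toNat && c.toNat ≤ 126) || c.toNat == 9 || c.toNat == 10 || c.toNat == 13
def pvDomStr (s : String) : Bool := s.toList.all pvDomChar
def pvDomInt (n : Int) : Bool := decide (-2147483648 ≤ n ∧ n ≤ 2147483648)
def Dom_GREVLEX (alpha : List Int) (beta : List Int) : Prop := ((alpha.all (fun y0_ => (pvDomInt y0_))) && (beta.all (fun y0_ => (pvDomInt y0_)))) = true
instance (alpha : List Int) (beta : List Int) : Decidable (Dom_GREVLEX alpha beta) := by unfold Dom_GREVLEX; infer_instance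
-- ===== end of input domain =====

-- B replaces A's staged passes (two sums, then a reverse-indexed scan with early
-- returns) by ONE fused forward pass over zip(alpha, beta) accumulating the degree
-- difference s and the delta d of the last differing coordinate, then returns
-- s < 0 or (s == 0 and d > 0) (alternative decomposition, same cost).

-- ===== PORT A =====
-- the 'for iter in range(0,n)' loop with its two early returns, as structural
-- recursion over the index list; the index n-1-iter is always in range when
-- n = len(alpha) = len(beta), so the 'none' (IndexError) arm is unreachable there
def grevLoopA (alpha beta : List Int) (n : Int) : List Int → Bool
  | [] => false
  | i :: rest =>
    match PySem.List.pyGet? alpha (n - 1 - i), PySem.List.pyGet? beta (n - 1 - i) with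
    | some a, some b =>
      if a < b then false
      else if b < a then true
      else grevLoopA alpha beta n rest
    | _, _ => false

def GREVLEX (alpha : List Int) (beta : List Int) : Bool :=
  if ¬ (alpha.length = beta.length) then false  -- raise ValueError; excluded by Pre_GREVLEX
  else if alpha.sum < beta.sum then true
  else if beta.sum < alpha.sum then false
  else grevLoopA alpha beta alpha.length (PySem.List.pyRange 0 alpha.length 1)

-- ===== PORT B =====
-- Source B's loop body: s += a - b; if a != b: d = a - b
def stepB (sd : Int × Int) (p : Int × Int) : Int × Int :=
  (sd.1 + (p.1 - p.2), if p.1 ≠ p.2 then p.1 - p.2 else sd.2)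

def GREVLEX_alt (alpha : List Int) (beta : List Int) : Bool :=
  if ¬ (alpha.length = beta.length) then false  -- raise ValueError; excluded by Pre_GREVLEX
  else
    let sd := (alpha.zip beta).foldl stepB (0, 0)
    decide (sd.1 < 0 ∨ (sd.1 = 0 ∧ 0 < sd.2))

-- ===== PRECONDITION & SPEC =====
-- Pre_ excludes exactly the inputs of different length, on which both A and B raise ValueError
def Pre_GREVLEX (alpha : List Int) (beta : List Int) : Prop := alpha.length = beta.length
instance (alpha : List Int) (beta : List Int) : Decidable (Pre_GREVLEX alpha beta) := by unfold Pre_GREVLEX; infer_instance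
def pvWitness_GREVLEX : List Int × List Int := ([1, 2, 0], [0, 1, 2])

def Spec_GREVLEX (alpha : List Int) (beta : List Int) (out : Bool) : Prop := out = GREVLEX_alt alpha beta
instance (alpha : List Int) (beta : List Int) (out : Bool) : Decidable (Spec_GREVLEX alpha beta out) := by unfold Spec_GREVLEX; infer_instance

-- ===== CLAIM (what is proved, stated in full; the proofs are below) =====
def Claim_equal_GREVLEX : Prop := ∀ (alpha : List Int) (beta : List Int), Dom_GREVLEX alpha beta → Pre_GREVLEX alpha beta → Spec_GREVLEX alpha beta (GREVLEX alpha beta)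

-- ===== LEMMAS AND PROOFS =====

-- the d-component of B's fold alone
def dAcc (d0 : Int) (l : List (Int × Int)) : Int :=
  l.foldl (fun d p => if p.1 ≠ p.2 then p.1 - p.2 else d) d0

-- the result of A's back-to-front early-exit scan, as a scan of a pair list
def rscan : List (Int × Int) → Bool
  | [] => false
  | (x, y) :: t => if x < y then false else if y < x then true else rscan t

theorem foldl_stepB (l : List (Int × Int)) : ∀ s0 d0 : Int,
    l.foldl stepB (s0, d0) = (s0 + (l.map (fun p => p.1 - p.2)).sum, dAcc d0 l) := by
  induction l with
  | nil => intro s0 d0; simp [dAcc]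
  | cons p t ih =>
    intro s0 d0
    simp only [List.foldl_cons, stepB, ih, List.map_cons, List.sum_cons, dAcc, Prod.mk.injEq]
    exact ⟨by ring, trivial⟩

theorem sum_zip_sub (a : List Int) : ∀ b : List Int, a.length = b.length →
    ((a.zip b).map (fun p => p.1 - p.2)).sum = a.sum - b.sum := by
  induction a with
  | nil => intro b hb; simp [(List.length_eq_zero_iff).mp hb.symm]
  | cons x t ih =>
    intro b hb
    cases b with
    | nil => simp at hb
    | cons y u =>
      simp only [List.zip_cons_cons, List.map_cons, List.sum_cons, List.sum_cons,
        ih u (by simpa using hb)]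
      ring

theorem rscan_reverse_eq_dAcc (l : List (Int × Int)) :
    rscan l.reverse = decide (0 < dAcc 0 l) := by
  induction l using List.reverseRecOn with
  | nil => simp [rscan, dAcc]
  | append_singleton t p ih =>
    obtain ⟨x, y⟩ := p
    rw [List.reverse_append]
    simp only [List.reverse_singleton, List.singleton_append, rscan]
    have hd : dAcc 0 (t ++ [(x, y)]) = if x ≠ y then x - y else dAcc 0 t := by
      simp [dAcc, List.foldl_append]
    rcases lt_trichotomy x y with h | h | h
    · rw [if_pos h, hd, if_pos (by omega)]
      simp; omega
    · rw [if_neg (by omega), if_neg (by omega), hd, if_neg (by omega), ih]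
    · rw [if_neg (by omega), if_pos h, hd, if_pos (by omega)]
      simp; omega

-- A's scan from index k onward equals rscan on the reversed zip dropped at k
theorem grevLoopA_eq_rscan (a b : List Int) (hl : a.length = b.length) :
    ∀ (m k : Nat), k + m = a.length →
      grevLoopA a b (a.length : Int) (PySem.List.pyRange (k : Int) (a.length : Int) 1) =
      rscan ((a.zip b).reverse.drop k) := by
  intro m
  induction m with
  | zero =>
    intro k hk
    have hk' : k = a.length := by omega
    rw [PySem.List.pyRange_one_eq_nil (by exact_mod_cast hk'.ge)]
    rw [List.drop_eq_nil_of_le (by simp [hk', hl])]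
    rfl
  | succ m ih =>
    intro k hk
    have hklt : k < a.length := by omega
    have hkb : k < b.length := by omega
    rw [PySem.List.pyRange_one_cons (by exact_mod_cast hklt)]
    have hidx : ((a.length : Int) - 1 - (k : Int)) = ((a.length - 1 - k : Nat) : Int) := by
      omega
    have hia : a.length - 1 - k < a.length := by omega
    have hib : a.length - 1 - k < b.length := by omega
    have hga : PySem.List.pyGet? a ((a.length : Int) - 1 - (k : Int)) = some a[a.length - 1 - k] := by
      rw [hidx, PySem.List.pyGet?_natCast, List.getElem?_eq_getElem hia]
    have hgb : PySem.List.pyGet? b ((a.length : Int) - 1 - (k : Int)) = some b[a.length - 1 - k] := by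
      rw [hidx, PySem.List.pyGet?_natCast, List.getElem?_eq_getElem hib]
    have hzl : (a.zip b).length = a.length := by simp [List.length_zip]; omega
    have hrk : k < (a.zip b).reverse.length := by simpa [hzl] using hklt
    rw [List.drop_eq_getElem_cons hrk]
    have hrz : (a.zip b).reverse[k]'hrk = (a[a.length - 1 - k]'hia, b[a.length - 1 - k]'hib) := by
      rw [List.getElem_reverse]
      have hzi : (a.zip b).length - 1 - k < (a.zip b).length := by omega
      rw [List.getElem_zip]
      simp only [Prod.mk.injEq]
      constructor <;> congr 1 <;> omega
    rw [hrz, grevLoopA, hga, hgb, rscan]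
    have hrec := ih (k + 1) (by omega)
    have hc : ((k : Int) + 1) = ((k + 1 : Nat) : Int) := by push_cast; ring
    rcases lt_trichotomy (a[a.length - 1 - k]'hia) (b[a.length - 1 - k]'hib) with h | h | h
    · simp [h]
    · rw [h]
      simp only [lt_irrefl, if_false]
      rw [hc, hrec]
    · simp [h]

-- ===== VERDICT (by name: the statement is the Claim_ definition above) =====
theorem GREVLEX_spec : Claim_equal_GREVLEX := by
  intro alpha beta _ hpre
  have hl : alpha.length = beta.length := hpre
  unfold Spec_GREVLEX GREVLEX GREVLEX_alt
  rw [if_neg (not_not_intro hl), if_neg (not_not_intro hl)]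
  simp only [foldl_stepB, sum_zip_sub alpha beta hl]
  have hmain := grevLoopA_eq_rscan alpha beta hl alpha.length 0 (by omega)
  rw [List.drop_zero] at hmain
  simp only [Nat.cast_zero] at hmain
  rcases lt_trichotomy alpha.sum beta.sum with h | h | h
  · rw [if_pos h]; symm; simp; omega
  · rw [if_neg (by omega), if_neg (by omega), hmain, rscan_reverse_eq_dAcc]
    simp [h]
  · rw [if_neg (not_lt.mpr h.le), if_pos h]; symm; simp; omega
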